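-- pv_equiv track=rewrite | github.com/router-hub/snapCode | _submissions/18UEE071_Ayush/Day4/amazingSubArray.py | solve
-- ===== SOURCE A (Python) =====
-- def solve(sd):
--     container={'a':0,'e':0,'i':0,'o':0,'u':0,'A':0,'E':0,'I':0,"O":0,'U':0}
--     s=0
--     for i in range(len(sd)):
--         ch = sd[i]
--         if ch in container.keys():
--             s+=(len(sd)-i)
--
--     return(s%10003)
-- ===== SOURCE B (Python) =====
-- def solve(sd):
--     count = 0
--     total = 0
--     for ch in sd:
--         if ch in "aeiouAEIOU":
--             count += 1
--         total += count
--     return total % 10003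
-- ===== Notes on version B (the rewrite author's own statement) =====
-- stated objective: alternative
-- what changed: Counts by ending index instead of starting index: B maintains a running prefix vowel count and adds it at every character, instead of A's dict-keys membership test adding (len-i) per vowel start; no dict, no index arithmetic.
import Mathlib
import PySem

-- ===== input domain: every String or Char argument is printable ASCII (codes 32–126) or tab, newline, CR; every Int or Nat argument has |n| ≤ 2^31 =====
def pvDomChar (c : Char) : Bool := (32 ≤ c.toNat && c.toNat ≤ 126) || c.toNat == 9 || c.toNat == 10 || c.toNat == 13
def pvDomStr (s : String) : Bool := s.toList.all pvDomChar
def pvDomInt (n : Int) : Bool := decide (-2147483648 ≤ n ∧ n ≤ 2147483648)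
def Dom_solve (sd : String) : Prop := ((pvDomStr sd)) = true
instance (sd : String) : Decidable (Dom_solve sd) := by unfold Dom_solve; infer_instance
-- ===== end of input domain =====

-- B counts amazing subarrays by ending index with a running prefix vowel count, instead of A's
-- dict-keys membership adding (len - i) per vowel start; same value mod 10003, alternative decomposition.


-- ===== PORT A =====
-- container = {'a':0,'e':0,'i':0,'o':0,'u':0,'A':0,'E':0,'I':0,'O':0,'U':0}
def pvContainer : PySem.Dict Char Int :=
  (((((((((PySem.Dict.empty.insert 'a' 0).insert 'e' 0).insert 'i' 0).insert 'o' 0).insert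
      'u' 0).insert 'A' 0).insert 'E' 0).insert 'I' 0).insert 'O' 0).insert 'U' 0

def solve (sd : String) : Int :=
  let container := pvContainer
  let n : Int := (sd.toList.length : Int)
  -- for i in range(len(sd)): ch = sd[i]; i is always in range, so pyGetD's default is never used
  let s : Int := (PySem.List.pyRange 0 n 1).foldl
    (fun s i =>
      let ch := PySem.List.pyGetD sd.toList i ' '
      if container.keys.contains ch then s + (n - i) else s) 0
  PySem.Int.mod s 10003

-- ===== PORT B =====
def solve_alt (sd : String) : Int :=
  let r : Int × Int := sd.toList.foldl
    (fun (p : Int × Int) ch =>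
      let c := if ("aeiouAEIOU".toList.contains ch) then p.1 + 1 else p.1
      (c, p.2 + c)) (0, 0)
  PySem.Int.mod r.2 10003

-- ===== PRECONDITION & SPEC =====
def Spec_solve (sd : String) (out : Int) : Prop := out = solve_alt sd
instance (sd : String) (out : Int) : Decidable (Spec_solve sd out) := by unfold Spec_solve; infer_instance

-- ===== CLAIM (what is proved, stated in full; the proofs are below) =====
def Claim_equal_solve : Prop := ∀ (sd : String), Dom_solve sd → Spec_solve sd (solve sd)

-- ===== LEMMAS AND PROOFS =====

def pvVowel (ch : Char) : Bool := "aeiouAEIOU".toList.contains ch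

theorem pvContainer_keys : pvContainer.keys = "aeiouAEIOU".toList := by decide

-- A's loop, generalized: weight (m - k), access by List.getD over Nat indices
def pvAf (cs : List Char) (m : Int) (s : Int) : Int :=
  (List.range cs.length).foldl
    (fun s k => if pvVowel (cs.getD k ' ') then s + (m - (k : Int)) else s) s

theorem pvAf_nil (m s : Int) : pvAf [] m s = s := by simp [pvAf]

theorem pvAf_append (cs : List Char) (c : Char) (m s : Int) :
    pvAf (cs ++ [c]) m s =
      (if pvVowel c then pvAf cs m s + (m - (cs.length : Int)) else pvAf cs m s) := by
  have hF : (List.range cs.length).foldl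
      (fun s k => if pvVowel ((cs ++ [c]).getD k ' ') then s + (m - (k : Int)) else s) s
    = (List.range cs.length).foldl
      (fun s k => if pvVowel (cs.getD k ' ') then s + (m - (k : Int)) else s) s := by
    apply PySem.List.foldl_congr_mem
    intro acc k hk
    have hklt : k < cs.length := List.mem_range.mp hk
    rw [show (cs ++ [c]).getD k ' ' = cs.getD k ' ' by
      simp [List.getD, List.getElem?_append_left hklt]]
  have hlast : (cs ++ [c]).getD cs.length ' ' = c := by
    simp [List.getD]
  unfold pvAf
  rw [List.length_append, List.length_cons, List.length_nil, Nat.add_zero,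
      List.range_succ, List.foldl_append, List.foldl_cons, List.foldl_nil, hlast, hF]

theorem pvAf_succ (cs : List Char) (m s : Int) :
    pvAf cs (m + 1) s = pvAf cs m s + (cs.countP pvVowel : Int) := by
  induction cs using List.reverseRecOn generalizing s with
  | nil => simp [pvAf_nil]
  | append_singleton cs c ih =>
    rw [pvAf_append, pvAf_append, List.countP_append]
    by_cases hv : pvVowel c
    · simp only [if_true, ih, List.countP_cons, List.countP_nil, hv]
      push_cast
      ring
    · simp [hv, ih]

-- B's loop
def pvBf (cs : List Char) (p : Int × Int) : Int × Int :=
  cs.foldl (fun (p : Int × Int) ch =>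
    let c := if pvVowel ch then p.1 + 1 else p.1
    (c, p.2 + c)) p

theorem pvBf_append (cs : List Char) (c : Char) (p : Int × Int) :
    pvBf (cs ++ [c]) p =
      (let cnt := if pvVowel c then (pvBf cs p).1 + 1 else (pvBf cs p).1
       (cnt, (pvBf cs p).2 + cnt)) := by
  simp [pvBf, List.foldl_append]

theorem pvMain (cs : List Char) :
    (pvBf cs (0, 0)).1 = (cs.countP pvVowel : Int) ∧
    pvAf cs (cs.length : Int) 0 = (pvBf cs (0, 0)).2 := by
  induction cs using List.reverseRecOn with
  | nil => simp [pvBf, pvAf_nil]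
  | append_singleton cs c ih =>
    obtain ⟨ih1, ih2⟩ := ih
    rw [pvBf_append]
    have hlen : ((cs ++ [c]).length : Int) = (cs.length : Int) + 1 := by
      simp
    have hcnt : ((cs ++ [c]).countP pvVowel : Int)
        = (cs.countP pvVowel : Int) + (if pvVowel c then 1 else 0) := by
      rw [List.countP_append]
      by_cases hv : pvVowel c <;> simp [hv]
    constructor
    · rw [hcnt]
      by_cases hv : pvVowel c <;> simp [hv, ih1]
    · rw [hlen, pvAf_append, pvAf_succ, ih2, ih1]
      by_cases hv : pvVowel c <;> simp [hv] <;> ring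

theorem pvA_fold_eq (cs : List Char) :
    (PySem.List.pyRange 0 (cs.length : Int) 1).foldl
      (fun s i =>
        if pvContainer.keys.contains (PySem.List.pyGetD cs i ' ') then
          s + ((cs.length : Int) - i)
        else s) 0
    = pvAf cs (cs.length : Int) 0 := by
  rw [PySem.List.pyRange_one, List.foldl_map]
  have hn : ((cs.length : Int) - 0).toNat = cs.length := by simp
  rw [hn]
  unfold pvAf
  apply PySem.List.foldl_congr_mem
  intro acc k _
  simp [pvContainer_keys, pvVowel, PySem.List.pyGetD_natCast]

-- ===== VERDICT (by name: the statement is the Claim_ definition above) =====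
theorem solve_spec : Claim_equal_solve := by
  intro sd _
  unfold Spec_solve
  simp only [solve, solve_alt]
  rw [pvA_fold_eq sd.toList, (pvMain sd.toList).2]
  rfl
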